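-- pv_equiv track=rewrite | github.com/b-vitamins/bibmgr | bibmgr/operations/duplicates.py | _authors_match
-- ===== SOURCE A (Python) =====
-- def _authors_match(a1: str, a2: str) -> bool:
--     """Check if two normalized author names match."""
--     if a1 == a2:
--         return True
--
--     # Check if one is abbreviation of other
--     parts1 = a1.split()
--     parts2 = a2.split()
--
--     if len(parts1) == len(parts2) and len(parts1) >= 2:
--         # Check last names match
--         if parts1[0] == parts2[0]:
--             # Check initials match
--             for p1, p2 in zip(parts1[1:], parts2[1:]):
--                 if p1[0] != p2[0]:
--                     return False
--             return True
--
--     return False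
-- ===== SOURCE B (Python) =====
-- def _authors_match(a1: str, a2: str) -> bool:
--     """Check if two normalized author names match."""
--     # Single synchronized left-to-right scan over the raw characters of both
--     # names; token lists are never built.  The first word must match in full,
--     # every later word only in its leading character, and both scans must run
--     # out of words together.
--
--     def drop_ws(s):
--         k = 0
--         while k < len(s) and s[k].isspace():
--             k += 1
--         return s[k:]
--
--     def split_word(s):
--         k = 0
--         while k < len(s) and not s[k].isspace():
--             k += 1
--         return s[:k], s[k:]
--
--     s1, s2 = drop_ws(a1), drop_ws(a2)
--     if not s1 or not s2:
--         return not s1 and not s2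
--     w1, s1 = split_word(s1)
--     w2, s2 = split_word(s2)
--     if w1 != w2:
--         return False
--     while True:
--         s1, s2 = drop_ws(s1), drop_ws(s2)
--         if not s1 or not s2:
--             return not s1 and not s2
--         if s1[0] != s2[0]:
--             return False
--         _, s1 = split_word(s1)
--         _, s2 = split_word(s2)
-- ===== Notes on version B (the rewrite author's own statement) =====
-- stated objective: alternative
-- what changed: B replaces A's split-into-token-lists-and-compare with a single synchronized character-level two-pointer scan of the two raw strings (skip whitespace, compare the first word in full, then only the leading character of each later word), never materializing the token lists A builds and compares.
-- intended difference: On names that differ as strings but split to the same token list of fewer than two tokens (i.e. differ only in surrounding whitespace, e.g. '' vs ' ' or 'smith' vs ' smith'), A returns False while B returns True; B's value is intended since A itself already ignores whitespace whenever there are two or more tokens. — e.g. on _authors_match("", " "): A returns false, B returns true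
import Mathlib
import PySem

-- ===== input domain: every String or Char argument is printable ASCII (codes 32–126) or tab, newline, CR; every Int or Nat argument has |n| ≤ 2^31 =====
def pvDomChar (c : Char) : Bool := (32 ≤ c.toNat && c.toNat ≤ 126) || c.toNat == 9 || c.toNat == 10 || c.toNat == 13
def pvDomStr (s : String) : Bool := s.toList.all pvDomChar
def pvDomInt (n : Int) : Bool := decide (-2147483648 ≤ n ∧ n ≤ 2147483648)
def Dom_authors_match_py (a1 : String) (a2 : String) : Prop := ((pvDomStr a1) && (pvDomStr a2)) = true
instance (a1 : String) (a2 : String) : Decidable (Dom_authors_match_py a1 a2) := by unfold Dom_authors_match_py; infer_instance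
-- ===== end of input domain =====

-- B replaces A's split-into-token-lists-and-compare with one synchronized character-level
-- two-pointer scan of the raw strings; objective: alternative (no speed claim).
-- B differs from A only on whitespace-variant names with < 2 tokens (see D_ below).


-- ===== PORT A =====
-- the 'for p1, p2 in zip(parts1[1:], parts2[1:])' loop; p1[0]/p2[0] ported as pyGet? … 0
-- (exact: split₀ tokens are nonempty, so pyGet? never hits Python's IndexError case here)
def initialsLoop : List (String × String) → Bool
  | [] => true
  | (p1, p2) :: rest =>
    if PySem.Str.pyGet? p1 0 ≠ PySem.Str.pyGet? p2 0 then false else initialsLoop rest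

def authors_match_py (a1 : String) (a2 : String) : Bool :=
  if a1 == a2 then true
  else
    let parts1 := PySem.Str.split₀ a1
    let parts2 := PySem.Str.split₀ a2
    if parts1.length == parts2.length && decide (2 ≤ parts1.length) then
      -- parts1[0]/parts2[0]: index 0 is in range here (length ≥ 2), so pyGetD is exact
      if PySem.List.pyGetD parts1 0 "" == PySem.List.pyGetD parts2 0 "" then
        initialsLoop ((PySem.List.slice parts1 (some 1) none).zip
                      (PySem.List.slice parts2 (some 1) none))
      else false
    else false

-- ===== PORT B =====
-- drop_ws(s): the 'advance k over whitespace, return s[k:]' loop = dropWhile isspace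
def bDropWs (s : List Char) : List Char := s.dropWhile PySem.Chars.isspace

-- split_word(s): the 'advance k over non-whitespace, return (s[:k], s[k:])' loop
def bSplitWord (s : List Char) : List Char × List Char :=
  (s.takeWhile (fun c => !PySem.Chars.isspace c), s.dropWhile (fun c => !PySem.Chars.isspace c))

-- the head of a dropWhile result falsifies the predicate (used for termination of bLoop)
lemma dropWhile_head_false {α : Type} {p : α → Bool} {l : List α} {c : α} {r : List α}
    (h : l.dropWhile p = c :: r) : p c = false := by
  induction l with
  | nil => simp at h
  | cons a t ih =>
    rw [List.dropWhile_cons] at h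
    split at h
    · exact ih h
    · rename_i hp
      cases h
      simpa using hp

lemma bLoop_dec {s1 : List Char} {c1 : Char} {r1 : List Char}
    (h1 : bDropWs s1 = c1 :: r1) :
    (bSplitWord (c1 :: r1)).2.length < s1.length := by
  have hc1 : PySem.Chars.isspace c1 = false := dropWhile_head_false h1
  have hstep : (bSplitWord (c1 :: r1)).2 = r1.dropWhile (fun c => !PySem.Chars.isspace c) := by
    simp [bSplitWord, hc1]
  have h2 : (bSplitWord (c1 :: r1)).2.length ≤ r1.length := by
    rw [hstep]; exact List.length_dropWhile_le _ _
  have h3 : (c1 :: r1).length ≤ s1.length := by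
    rw [← h1]; exact List.length_dropWhile_le _ _
  simp only [List.length_cons] at h3
  omega

-- the 'while True' loop over the remaining words
def bLoop (s1 s2 : List Char) : Bool :=
  match h1 : bDropWs s1, bDropWs s2 with
  | [], [] => true
  | [], _ :: _ => false
  | _ :: _, [] => false
  | c1 :: r1, c2 :: r2 =>
    if c1 ≠ c2 then false
    else bLoop (bSplitWord (c1 :: r1)).2 (bSplitWord (c2 :: r2)).2
termination_by s1.length
decreasing_by exact bLoop_dec h1

def authors_match_py_alt (a1 : String) (a2 : String) : Bool :=
  match bDropWs a1.toList, bDropWs a2.toList with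
  | [], [] => true
  | [], _ :: _ => false
  | _ :: _, [] => false
  | c1 :: r1, c2 :: r2 =>
    if (bSplitWord (c1 :: r1)).1 ≠ (bSplitWord (c2 :: r2)).1 then false
    else bLoop (bSplitWord (c1 :: r1)).2 (bSplitWord (c2 :: r2)).2

-- ===== PRECONDITION & SPEC =====
-- On names that differ as strings but split to the same token list of fewer than two tokens
-- (whitespace-only variants, e.g. "" vs " " or "smith" vs " smith"), A returns false while B
-- returns true; B's value is intended since A itself ignores whitespace whenever there are ≥ 2 tokens.
def D_authors_match_py (a1 : String) (a2 : String) : Prop :=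
  a1 ≠ a2 ∧ PySem.Str.split₀ a1 = PySem.Str.split₀ a2 ∧ (PySem.Str.split₀ a1).length < 2
instance (a1 : String) (a2 : String) : Decidable (D_authors_match_py a1 a2) := by
  unfold D_authors_match_py; infer_instance

def Spec_authors_match_py (a1 : String) (a2 : String) (out : Bool) : Prop :=
  ¬ D_authors_match_py a1 a2 → out = authors_match_py_alt a1 a2
instance (a1 : String) (a2 : String) (out : Bool) : Decidable (Spec_authors_match_py a1 a2 out) := by
  unfold Spec_authors_match_py; infer_instance

def pvDiffWitness_authors_match_py : String × String := ("", " ")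
def pvDiffWitnessOut_authors_match_py : Bool × Bool := (false, true)

-- ===== CLAIM (what is proved, stated in full; the proofs are below) =====
def Claim_unchanged_authors_match_py : Prop := ∀ (a1 : String) (a2 : String), Dom_authors_match_py a1 a2 → Spec_authors_match_py a1 a2 (authors_match_py a1 a2)
def Claim_changed_authors_match_py : Prop := Dom_authors_match_py (pvDiffWitness_authors_match_py.1) (pvDiffWitness_authors_match_py.2) ∧ D_authors_match_py (pvDiffWitness_authors_match_py.1) (pvDiffWitness_authors_match_py.2) ∧ authors_match_py (pvDiffWitness_authors_match_py.1) (pvDiffWitness_authors_match_py.2) = pvDiffWitnessOut_authors_match_py.1 ∧ authors_match_py_alt (pvDiffWitness_authors_match_py.1) (pvDiffWitness_authors_match_py.2) = pvDiffWitnessOut_authors_match_py.2 ∧ pvDiffWitnessOut_authors_match_py.1 ≠ pvDiffWitnessOut_authors_match_py.2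
def Claim_exact_authors_match_py : Prop := ∀ (a1 : String) (a2 : String), Dom_authors_match_py a1 a2 → D_authors_match_py a1 a2 → authors_match_py a1 a2 ≠ authors_match_py_alt a1 a2

-- ===== LEMMAS AND PROOFS =====

-- clean recursive characterization of Python's whitespace split, used to relate both ports
def words (cs : List Char) : List (List Char) :=
  match h : cs.dropWhile PySem.Chars.isspace with
  | [] => []
  | c :: r =>
    (c :: r).takeWhile (fun c => !PySem.Chars.isspace c) ::
      words ((c :: r).dropWhile (fun c => !PySem.Chars.isspace c))
termination_by cs.length
decreasing_by exact bLoop_dec h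

lemma words_nil_of {cs : List Char} (h : cs.dropWhile PySem.Chars.isspace = []) :
    words cs = [] := by
  rw [words]
  split
  · rfl
  · rename_i heq; rw [h] at heq; cases heq

lemma words_cons_of {cs : List Char} {c : Char} {r : List Char}
    (h : cs.dropWhile PySem.Chars.isspace = c :: r) :
    words cs = (c :: r).takeWhile (fun c => !PySem.Chars.isspace c) ::
      words ((c :: r).dropWhile (fun c => !PySem.Chars.isspace c)) := by
  rw [words]
  split
  · rename_i heq; rw [h] at heq; cases heq
  · rename_i c' r' heq
    rw [h] at heq
    cases heq
    rfl

lemma words_nil : words [] = [] := words_nil_of rfl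

lemma words_cons_ws {c : Char} (cs : List Char) (hc : PySem.Chars.isspace c = true) :
    words (c :: cs) = words cs := by
  have hdw : (c :: cs).dropWhile PySem.Chars.isspace = cs.dropWhile PySem.Chars.isspace := by
    rw [List.dropWhile_cons, if_pos hc]
  cases h : cs.dropWhile PySem.Chars.isspace with
  | nil => rw [words_nil_of (hdw.trans h), words_nil_of h]
  | cons d r => rw [words_cons_of (hdw.trans h), words_cons_of h]

lemma words_cons_nws {c : Char} (cs : List Char) (hc : PySem.Chars.isspace c = false) :
    words (c :: cs) = (c :: cs.takeWhile (fun x => !PySem.Chars.isspace x)) ::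
      words (cs.dropWhile (fun x => !PySem.Chars.isspace x)) := by
  have hdw : (c :: cs).dropWhile PySem.Chars.isspace = c :: cs := by
    rw [List.dropWhile_cons, if_neg (by simp [hc])]
  rw [words_cons_of hdw, List.takeWhile_cons, List.dropWhile_cons]
  simp [hc]

-- the accumulator-free shape of split₀.go's recursion
def auxWords : List Char → List Char → List (List Char)
  | [], cur => if cur = [] then [] else [cur.reverse]
  | c :: rest, cur =>
    if PySem.Chars.isspace c then
      (if cur = [] then auxWords rest [] else cur.reverse :: auxWords rest [])
    else auxWords rest (c :: cur)

lemma go_eq_auxWords : ∀ (cs cur : List Char) (acc : List (List Char)),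
    PySem.Chars.split₀.go cs cur acc = acc.reverse ++ auxWords cs cur := by
  intro cs
  induction cs with
  | nil =>
    intro cur acc
    simp only [PySem.Chars.split₀.go, auxWords]
    by_cases h : cur = []
    · simp [h]
    · simp [h, List.isEmpty_iff]
  | cons c rest ih =>
    intro cur acc
    simp only [PySem.Chars.split₀.go, auxWords]
    by_cases hc : PySem.Chars.isspace c
    · by_cases h : cur = []
      · simp [hc, h, ih]
      · simp [hc, h, List.isEmpty_iff, ih]
    · simp [hc, ih]

lemma auxWords_eq_words : ∀ (cs cur : List Char),
    auxWords cs cur =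
      if cur = [] then words cs
      else (cur.reverse ++ cs.takeWhile (fun c => !PySem.Chars.isspace c)) ::
             words (cs.dropWhile (fun c => !PySem.Chars.isspace c)) := by
  intro cs
  induction cs with
  | nil =>
    intro cur
    by_cases h : cur = []
    · simp [auxWords, h, words_nil]
    · simp [auxWords, h, words_nil]
  | cons c rest ih =>
    intro cur
    by_cases hc : PySem.Chars.isspace c
    · by_cases h : cur = []
      · simp [auxWords, hc, h, ih, words_cons_ws rest hc]
      · simp [auxWords, hc, h, ih, words_cons_ws rest hc]
    · have hcf : PySem.Chars.isspace c = false := by simpa using hc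
      have hrec := ih (c :: cur)
      rw [if_neg (by simp)] at hrec
      simp only [auxWords, hcf, Bool.false_eq_true, if_false, hrec]
      by_cases h : cur = []
      · subst h
        rw [if_pos rfl, words_cons_nws rest hcf]
        simp
      · rw [if_neg h]
        simp [hcf]

theorem words_split₀ (cs : List Char) : PySem.Chars.split₀ cs = words cs := by
  show PySem.Chars.split₀.go cs [] [] = words cs
  rw [go_eq_auxWords, auxWords_eq_words]
  simp

-- initials-equality on word lists (the contract both ports' tail comparisons satisfy)
def initialsEq : List (List Char) → List (List Char) → Bool
  | [], [] => true
  | w1 :: r1, w2 :: r2 => (w1.head? == w2.head?) && initialsEq r1 r2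
  | _, _ => false

lemma head?_takeWhile_of_head (c : Char) (r : List Char) (hc : PySem.Chars.isspace c = false) :
    ((c :: r).takeWhile (fun x => !PySem.Chars.isspace x)).head? = some c := by
  simp [hc]

lemma bLoop_nil_of {s1 s2 : List Char} (h1 : bDropWs s1 = []) :
    bLoop s1 s2 = (bDropWs s2).isEmpty := by
  rw [bLoop]
  split <;> simp_all

lemma bLoop_cons_nil_of {s1 s2 : List Char} {c1 : Char} {r1 : List Char}
    (h1 : bDropWs s1 = c1 :: r1) (h2 : bDropWs s2 = []) :
    bLoop s1 s2 = false := by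
  rw [bLoop]
  split <;> simp_all

lemma bLoop_cons_cons_of {s1 s2 : List Char} {c1 c2 : Char} {r1 r2 : List Char}
    (h1 : bDropWs s1 = c1 :: r1) (h2 : bDropWs s2 = c2 :: r2) :
    bLoop s1 s2 = if c1 ≠ c2 then false
      else bLoop (bSplitWord (c1 :: r1)).2 (bSplitWord (c2 :: r2)).2 := by
  rw [bLoop]
  split
  · simp_all
  · simp_all
  · simp_all
  · rename_i c1' r1' c2' r2' heqA heqB
    rw [h1] at heqA
    rw [h2] at heqB
    cases heqA
    cases heqB
    rfl

lemma bLoop_eq_initialsEq_aux : ∀ (n : Nat) (s1 s2 : List Char), s1.length ≤ n →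
    bLoop s1 s2 = initialsEq (words s1) (words s2) := by
  intro n
  induction n with
  | zero =>
    intro s1 s2 hn
    have hs1 : s1 = [] := List.eq_nil_of_length_eq_zero (by omega)
    subst hs1
    rw [bLoop_nil_of rfl, words_nil]
    cases h2 : bDropWs s2 with
    | nil => rw [words_nil_of h2]; rfl
    | cons c2 r2 => rw [words_cons_of h2]; rfl
  | succ n ih =>
    intro s1 s2 hn
    cases h1 : bDropWs s1 with
    | nil =>
      rw [bLoop_nil_of h1, words_nil_of h1]
      cases h2 : bDropWs s2 with
      | nil => rw [words_nil_of h2]; rfl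
      | cons c2 r2 => rw [words_cons_of h2]; rfl
    | cons c1 r1 =>
      cases h2 : bDropWs s2 with
      | nil => rw [bLoop_cons_nil_of h1 h2, words_cons_of h1, words_nil_of h2]; rfl
      | cons c2 r2 =>
        have hc1 : PySem.Chars.isspace c1 = false := dropWhile_head_false h1
        have hc2 : PySem.Chars.isspace c2 = false := dropWhile_head_false h2
        rw [bLoop_cons_cons_of h1 h2, words_cons_of h1, words_cons_of h2]
        simp only [initialsEq, head?_takeWhile_of_head _ _ hc1, head?_takeWhile_of_head _ _ hc2]
        by_cases hcc : c1 = c2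
        · subst hcc
          rw [if_neg (by simp)]
          have hlt := bLoop_dec h1
          rw [ih _ _ (by omega)]
          simp [bSplitWord]
        · rw [if_pos hcc]
          simp [hcc]

theorem bLoop_eq_initialsEq (s1 s2 : List Char) :
    bLoop s1 s2 = initialsEq (words s1) (words s2) :=
  bLoop_eq_initialsEq_aux s1.length s1 s2 (le_refl _)

-- the contract of B's whole scan
def wMatch : List (List Char) → List (List Char) → Bool
  | [], [] => true
  | w1 :: r1, w2 :: r2 => (w1 == w2) && initialsEq r1 r2
  | _, _ => false

theorem alt_eq_wMatch (a1 a2 : String) :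
    authors_match_py_alt a1 a2 = wMatch (words a1.toList) (words a2.toList) := by
  rw [authors_match_py_alt]
  cases h1 : bDropWs a1.toList with
  | nil =>
    cases h2 : bDropWs a2.toList with
    | nil => rw [words_nil_of h1, words_nil_of h2]; rfl
    | cons c2 r2 => rw [words_nil_of h1, words_cons_of h2]; rfl
  | cons c1 r1 =>
    cases h2 : bDropWs a2.toList with
    | nil => rw [words_cons_of h1, words_nil_of h2]; rfl
    | cons c2 r2 =>
      rw [words_cons_of h1, words_cons_of h2]
      simp only [wMatch]
      rw [bLoop_eq_initialsEq]
      by_cases hw : (c1 :: r1).takeWhile (fun c => !PySem.Chars.isspace c)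
          = (c2 :: r2).takeWhile (fun c => !PySem.Chars.isspace c)
      · rw [if_neg (by simpa using hw)]
        simp [bSplitWord, hw]
      · rw [if_pos (by simpa using hw)]
        simp [hw]

lemma initialsEq_refl : ∀ (l : List (List Char)), initialsEq l l = true := by
  intro l
  induction l with
  | nil => rfl
  | cons w r ih => simp [initialsEq, ih]

lemma wMatch_refl (l : List (List Char)) : wMatch l l = true := by
  cases l with
  | nil => rfl
  | cons w r => simp [wMatch, initialsEq_refl]

lemma initialsEq_len_ne : ∀ (l1 l2 : List (List Char)),
    l1.length ≠ l2.length → initialsEq l1 l2 = false := by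
  intro l1
  induction l1 with
  | nil =>
    intro l2 h
    cases l2 with
    | nil => simp at h
    | cons w r => rfl
  | cons w1 r1 ih =>
    intro l2 h
    cases l2 with
    | nil => rfl
    | cons w2 r2 =>
      simp [initialsEq, ih r2 (by simpa using h)]

lemma pyGet0_ofList (w : List Char) : PySem.Str.pyGet? (String.ofList w) 0 = w.head? := by
  cases w <;> simp [PySem.Str.pyGet?, PySem.List.pyGet?, PySem.List.pyIdx?]

lemma initialsLoop_eq_initialsEq : ∀ (r1 r2 : List (List Char)), r1.length = r2.length →
    initialsLoop ((r1.map String.ofList).zip (r2.map String.ofList)) = initialsEq r1 r2 := by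
  intro r1
  induction r1 with
  | nil =>
    intro r2 h
    cases r2 with
    | nil => rfl
    | cons _ _ => simp at h
  | cons w1 t1 ih =>
    intro r2 h
    cases r2 with
    | nil => simp at h
    | cons w2 t2 =>
      simp only [List.map_cons, List.zip_cons_cons, initialsLoop, initialsEq, pyGet0_ofList]
      by_cases hh : w1.head? = w2.head?
      · rw [if_neg (by simp [hh]), ih t2 (by simpa using h)]
        simp [hh]
      · rw [if_pos (by simp [hh])]
        simp [hh]

-- words-list view of A's split results
lemma split₀_words (a : String) :
    PySem.Str.split₀ a = (words a.toList).map String.ofList := by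
  show (PySem.Chars.split₀ a.toList).map String.ofList = _
  rw [words_split₀]

lemma main_unchanged (a1 a2 : String) (hD : ¬ D_authors_match_py a1 a2) :
    authors_match_py a1 a2 = authors_match_py_alt a1 a2 := by
  rw [alt_eq_wMatch]
  by_cases heq : a1 = a2
  · subst heq
    simp [authors_match_py, wMatch_refl]
  · rw [authors_match_py, if_neg (by simpa using heq)]
    simp only [split₀_words]
    by_cases hlen : (words a1.toList).length = (words a2.toList).length
    · by_cases h2 : 2 ≤ (words a1.toList).length
      · -- length ≥ 2 branch
        have h2' : 2 ≤ (words a2.toList).length := hlen ▸ h2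
        rw [if_pos (by simp [hlen, h2'])]
        obtain ⟨w1, r1, hW1⟩ := List.exists_cons_of_ne_nil
          (show words a1.toList ≠ [] by intro h; rw [h] at h2; simp at h2)
        obtain ⟨w2, r2, hW2⟩ := List.exists_cons_of_ne_nil
          (show words a2.toList ≠ [] by intro h; rw [h] at h2'; simp at h2')
        have hrlen : r1.length = r2.length := by
          rw [hW1, hW2] at hlen; simpa using hlen
        rw [hW1, hW2]
        simp only [List.map_cons, PySem.List.pyGetD]
        have hslice : ∀ (w : String) (r : List String),
            PySem.List.slice (w :: r) (some 1) none = r := by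
          intro w r; simp [pysem]
        rw [hslice, hslice]
        by_cases hw : w1 = w2
        · subst hw
          rw [if_pos (by simp [PySem.List.pyGet?, PySem.List.pyIdx?])]
          rw [initialsLoop_eq_initialsEq r1 r2 hrlen]
          simp [wMatch]
        · rw [if_neg (by simp [PySem.List.pyGet?, PySem.List.pyIdx?, String.ofList_inj, hw])]
          simp [wMatch, hw]
      · -- fewer than two words: A is false; ¬D forbids equal word lists here
        rw [if_neg (by simp [hlen]; omega)]
        have hne : words a1.toList ≠ words a2.toList := by
          intro h
          exact hD ⟨heq, by rw [split₀_words, split₀_words, h], by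
            rw [split₀_words]; simpa using h2⟩
        cases hA1 : words a1.toList with
        | nil =>
          cases hA2 : words a2.toList with
          | nil => rw [hA1, hA2] at hne; simp at hne
          | cons w2 t2 => simp [wMatch]
        | cons w1 t1 =>
          have ht1 : t1 = [] := by
            rw [hA1] at h2; simp only [List.length_cons, not_le] at h2
            exact List.eq_nil_of_length_eq_zero (by omega)
          cases hA2 : words a2.toList with
          | nil => simp [wMatch]
          | cons w2 t2 =>
            have ht2 : t2 = [] := by
              rw [hA1, hA2] at hlen
              simp only [List.length_cons, ht1, List.length_nil] at hlen
              exact List.eq_nil_of_length_eq_zero (by omega)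
            subst ht1; subst ht2
            have hw : w1 ≠ w2 := by
              intro h; rw [hA1, hA2, h] at hne; simp at hne
            simp [wMatch, initialsEq, hw]
    · -- different word counts: both sides false
      rw [if_neg (by simp [hlen])]
      cases hA1 : words a1.toList with
      | nil =>
        cases hA2 : words a2.toList with
        | nil => rw [hA1, hA2] at hlen; simp at hlen
        | cons w2 t2 => simp [wMatch]
      | cons w1 t1 =>
        cases hA2 : words a2.toList with
        | nil => simp [wMatch]
        | cons w2 t2 =>
          have hne : t1.length ≠ t2.length := by
            rw [hA1, hA2] at hlen; simpa using hlen
          simp [wMatch, initialsEq_len_ne t1 t2 hne]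

-- ===== VERDICT (by name: the statement is the Claim_ definition above) =====
theorem authors_match_py_spec : Claim_unchanged_authors_match_py := by
  intro a1 a2 _ hD
  exact main_unchanged a1 a2 hD

theorem authors_match_py_changed : Claim_changed_authors_match_py := by
  unfold Claim_changed_authors_match_py; decide

theorem authors_match_py_tight : Claim_exact_authors_match_py := by
  intro a1 a2 _ hD
  rcases hD with ⟨hne, hsp, hlt⟩
  have hW : words a1.toList = words a2.toList := by
    rw [split₀_words, split₀_words] at hsp
    exact List.map_injective_iff.mpr (fun x y h => by
      simpa [String.ofList_inj] using h) hsp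
  have hA : authors_match_py a1 a2 = false := by
    rw [authors_match_py, if_neg (by simpa using hne)]
    simp only []
    rw [if_neg (by simp; omega)]
  have hB : authors_match_py_alt a1 a2 = true := by
    rw [alt_eq_wMatch, hW, wMatch_refl]
  rw [hA, hB]
  simp
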